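-- pv_equiv track=rewrite | github.com/ahejackson/devfolder-python | src/devfolder/classifier.py | parse_remote_url
-- ===== SOURCE A (Python) =====
-- def parse_remote_url(url: str) -> tuple[str, str] | None:
--     """Extract (host, owner) from a git remote URL.
--
--     Handles SSH (`git@host:owner/repo.git`), HTTPS (`https://host/owner/repo.git`),
--     and `git://` URLs.
--
--     Args:
--         url: The git remote URL.
--
--     Returns:
--         A `(host, owner)` tuple, or None if the URL can't be parsed.
--     """
--     if url.startswith("git@"):
--         # git@github.com:owner/repo.git
--         host_part, sep, path = url.partition(":")
--         if not sep:
--             return None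
--         host = host_part[len("git@") :]
--     elif "://" in url:
--         # https://github.com/owner/repo.git or git://github.com/owner/repo.git
--         _, _, rest = url.partition("://")
--         host, _, path = rest.partition("/")
--     else:
--         return None
--
--     if not host:
--         return None
--
--     path_parts = [p for p in path.split("/") if p]
--     if not path_parts:
--         return None
--
--     return host, path_parts[0]
-- ===== SOURCE B (Python) =====
-- def parse_remote_url(url: str) -> tuple[str, str] | None:
--     """Single left-to-right index scan: a small automaton finds the scheme marker,
--     then host and owner are read in place; no partition/split lists are built."""
--     n = len(url)
--     if url.startswith("git@"):
--         i, term = 4, ":"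
--     else:
--         i, match, pat = 0, 0, "://"
--         while i < n and match < 3:
--             match = match + 1 if url[i] == pat[match] else (1 if url[i] == ":" else 0)
--             i += 1
--         if match < 3:
--             return None
--         term = "/"
--     j = i
--     while j < n and url[j] != term:
--         j += 1
--     if j == i:
--         return None
--     host = url[i:j]
--     j += 1
--     while j < n and url[j] == "/":
--         j += 1
--     if j >= n:
--         return None
--     k = j
--     while k < n and url[k] != "/":
--         k += 1
--     return host, url[j:k]
-- ===== Notes on version B (the rewrite author's own statement) =====
-- stated objective: alternative
-- what changed: Replaces partition()/split()/filter with a single left-to-right index scan: a three-state automaton locates the first scheme separator, then host and owner are delimited in place by advancing indices, so no intermediate tuples or segment lists are built.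
import Mathlib
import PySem

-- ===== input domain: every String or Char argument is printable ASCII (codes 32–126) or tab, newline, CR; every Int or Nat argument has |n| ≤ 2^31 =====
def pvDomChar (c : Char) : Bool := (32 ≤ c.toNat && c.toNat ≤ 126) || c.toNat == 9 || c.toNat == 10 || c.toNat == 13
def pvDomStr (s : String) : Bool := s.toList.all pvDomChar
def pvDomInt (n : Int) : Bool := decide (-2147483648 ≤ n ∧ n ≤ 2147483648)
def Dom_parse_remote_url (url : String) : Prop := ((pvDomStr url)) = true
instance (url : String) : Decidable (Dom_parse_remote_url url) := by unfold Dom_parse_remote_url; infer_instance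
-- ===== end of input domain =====

-- B replaces A's partition()/split()/filter passes by one left-to-right index scan (a three-state
-- automaton finds the scheme separator, then host and owner are delimited in place); same cost, no claim of speed.

-- ===== PORT A =====
-- hand port of Python str.partition(sep) for nonempty sep (exact: splits at the FIRST
-- occurrence found by Chars.find; the Bool records whether the separator was found)
def pyPartitionA (s sep : List Char) : List Char × Bool × List Char :=
  let i := PySem.Chars.find s sep
  if i = -1 then (s, false, [])
  else (s.take i.toNat, true, s.drop (i.toNat + sep.length))

-- the straight-line code after A's if/elif: host check, split('/'), filter, [0]
def pyTailA (host path : List Char) : Option (String × String) :=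
  if host.isEmpty then none
  else
    let path_parts := (PySem.Chars.splitOn path ['/']).filter (fun p => !p.isEmpty)
    if path_parts.isEmpty then none
    else some (String.mk host, String.mk path_parts.headI)

def parse_remote_url (url : String) : Option (String × String) :=
  let u := url.toList
  if PySem.Chars.startswith u "git@".toList then
    let r := pyPartitionA u [':']
    if !r.2.1 then none
    else pyTailA (PySem.List.slice r.1 (some 4) none) r.2.2  -- host_part[len("git@"):]
  else if PySem.Chars.isIn "://".toList u then
    let r := pyPartitionA u "://".toList
    let r2 := pyPartitionA r.2.2 ['/']
    pyTailA r2.1 r2.2.2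
  else none

-- ===== PORT B =====
-- Source B's scheme-scanning while loop: the remaining characters plus the automaton state (match counter);
-- exits with the suffix after the first '://' (state 3) or none at end of input
def scanScheme : List Char → Nat → Option (List Char)
  | [], m => if 3 ≤ m then some [] else none
  | c :: t, m =>
    if 3 ≤ m then some (c :: t)
    else scanScheme t (if c = [':', '/', '/'].getD m ' ' then m + 1 else if c = ':' then 1 else 0)

-- Source B's host while loop: chars up to the terminator, and the suffix after it
def hostSplit (term : Char) : List Char → List Char × List Char
  | [] => ([], [])
  | c :: t => if c = term then ([], t) else
      let r := hostSplit term t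
      (c :: r.1, r.2)

-- Source B's slash-skipping while loop
def skipSlash : List Char → List Char
  | [] => []
  | c :: t => if c = '/' then skipSlash t else c :: t

-- Source B's owner while loop: chars up to the next '/'
def ownerTake : List Char → List Char
  | [] => []
  | c :: t => if c = '/' then [] else c :: ownerTake t

def parse_remote_url_alt (url : String) : Option (String × String) :=
  let u := url.toList
  let start? : Option (List Char × Char) :=
    if PySem.Chars.startswith u "git@".toList then some (u.drop 4, ':')
    else match scanScheme u 0 with
      | some r => some (r, '/')
      | none => none
  match start? with
  | none => none
  | some (l, term) =>
    let hr := hostSplit term l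
    if hr.1.isEmpty then none
    else
      let p := skipSlash hr.2
      if p.isEmpty then none
      else some (String.mk hr.1, String.mk (ownerTake p))

-- ===== PRECONDITION & SPEC =====
def Spec_parse_remote_url (url : String) (out : Option (String × String)) : Prop := out = parse_remote_url_alt url
instance (url : String) (out : Option (String × String)) : Decidable (Spec_parse_remote_url url out) := by unfold Spec_parse_remote_url; infer_instance

-- ===== CLAIM (what is proved, stated in full; the proofs are below) =====
def Claim_equal_parse_remote_url : Prop := ∀ (url : String), Dom_parse_remote_url url → Spec_parse_remote_url url (parse_remote_url url)

-- ===== LEMMAS AND PROOFS =====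

-- find.go is invariant under shifting the running index
theorem findGo_shift (sub : List Char) (hsub : sub ≠ []) (l : List Char) (k : Nat) :
    PySem.Chars.find.go sub l k =
      if PySem.Chars.find.go sub l 0 = -1 then -1 else PySem.Chars.find.go sub l 0 + k := by
  induction l generalizing k with
  | nil => simp [PySem.Chars.find.go, List.isEmpty_iff, hsub]
  | cons c t ih =>
    by_cases hp : sub.isPrefixOf (c :: t)
    · simp [PySem.Chars.find.go, hp]
    · rw [show PySem.Chars.find.go sub (c :: t) k
            = PySem.Chars.find.go sub t (k + 1) by simp [PySem.Chars.find.go, hp],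
          show PySem.Chars.find.go sub (c :: t) 0
            = PySem.Chars.find.go sub t (0 + 1) by simp [PySem.Chars.find.go, hp],
          ih, ih 1]
      have hb : -1 ≤ PySem.Chars.find.go sub t 0 := PySem.Chars.neg_one_le_find t sub
      by_cases h0 : PySem.Chars.find.go sub t 0 = -1
      · simp [h0]
      · have h1 : ¬ (PySem.Chars.find.go sub t 0 + 1 = -1) := by omega
        simp only [h0, if_neg h0, if_neg h1, if_false]
        split_ifs <;> omega

-- Chars.find on a cons whose head does not start the pattern
theorem find_cons_shift (sub : List Char) (hsub : sub ≠ []) (c : Char) (t : List Char)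
    (hp : sub.isPrefixOf (c :: t) = false) :
    PySem.Chars.find (c :: t) sub =
      if PySem.Chars.find t sub = -1 then -1 else PySem.Chars.find t sub + 1 := by
  show PySem.Chars.find.go sub (c :: t) 0 = _
  rw [show PySem.Chars.find.go sub (c :: t) 0
        = PySem.Chars.find.go sub t (0 + 1) by simp [PySem.Chars.find.go, hp],
      findGo_shift sub hsub t 1]
  rfl

theorem find_slash_cons (a c : Char) (t : List Char) (hc : (c == a) = false) :
    PySem.Chars.find (c :: t) [a] =
      if PySem.Chars.find t [a] = -1 then -1 else PySem.Chars.find t [a] + 1 := by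
  apply find_cons_shift [a] (by simp) c t
  simp [List.isPrefixOf]
  intro h; rw [h] at hc; simp at hc

theorem find_head (a : Char) (t : List Char) : PySem.Chars.find (a :: t) [a] = 0 := by
  show PySem.Chars.find.go [a] (a :: t) 0 = 0
  rw [PySem.Chars.find.go]
  simp [List.isPrefixOf]

theorem find_nil_single (a : Char) : PySem.Chars.find [] [a] = -1 := by
  show PySem.Chars.find.go [a] [] 0 = -1
  rw [PySem.Chars.find.go]
  simp

-- str.partition characterised position by position
theorem partitionA_nil (a : Char) : pyPartitionA [] [a] = ([], false, []) := by
  simp [pyPartitionA, find_nil_single]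

theorem partitionA_head (a : Char) (t : List Char) : pyPartitionA (a :: t) [a] = ([], true, t) := by
  simp [pyPartitionA, find_head]

theorem partitionA_cons (a c : Char) (t : List Char) (h : ¬ c = a) :
    pyPartitionA (c :: t) [a]
      = (c :: (pyPartitionA t [a]).1, (pyPartitionA t [a]).2.1, (pyPartitionA t [a]).2.2) := by
  unfold pyPartitionA
  rw [find_slash_cons a c t (by simpa using h)]
  by_cases hf : PySem.Chars.find t [a] = -1
  · simp [hf]
  · have hb : -1 ≤ PySem.Chars.find t [a] := PySem.Chars.neg_one_le_find t [a]
    have h1 : ¬ (PySem.Chars.find t [a] + 1 = -1) := by omega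
    have ht : (PySem.Chars.find t [a] + 1).toNat = (PySem.Chars.find t [a]).toNat + 1 := by omega
    simp [hf, h1, ht, List.take_succ_cons, List.drop_succ_cons]

theorem partitionA_notfound (a : Char) (l : List Char) (h : (pyPartitionA l [a]).2.1 = false) :
    pyPartitionA l [a] = (l, false, []) := by
  unfold pyPartitionA at *
  by_cases hf : PySem.Chars.find l [a] = -1
  · simp [hf]
  · simp [hf] at h

-- Source B's host loop computes exactly the two outer components of str.partition
theorem hostSplit_eq (a : Char) (l : List Char) :
    hostSplit a l = ((pyPartitionA l [a]).1, (pyPartitionA l [a]).2.2) := by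
  induction l with
  | nil => simp [hostSplit, partitionA_nil]
  | cons c t ih =>
    by_cases h : c = a
    · subst h; simp [hostSplit, partitionA_head]
    · simp [hostSplit, h, partitionA_cons a c t h, ih]

-- the '/'-segments of a character list (proof-only model of str.split('/'))
def segs : List Char → List (List Char)
  | [] => [[]]
  | c :: r =>
    if c == '/' then [] :: segs r
    else match segs r with
      | s :: ss => (c :: s) :: ss
      | [] => [[c]]

theorem segs_ne_nil (cs : List Char) : segs cs ≠ [] := by
  cases cs with
  | nil => simp [segs]
  | cons c r =>
    by_cases h : (c == '/') <;> simp [segs, h] <;> cases hr : segs r <;> simp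

-- prepend onto the first segment
def consHead (pre : List Char) : List (List Char) → List (List Char)
  | s :: ss => (pre ++ s) :: ss
  | [] => [pre]

theorem consHead_nil (ss : List (List Char)) (h : ss ≠ []) : consHead [] ss = ss := by
  cases ss with
  | nil => exact absurd rfl h
  | cons s ss => simp [consHead]

theorem splitOnGo_spec (fuel : Nat) (l cur : List Char) (acc : List (List Char))
    (hf : l.length ≤ fuel) :
    PySem.Chars.splitOn.go ['/'] fuel l cur acc = acc.reverse ++ consHead cur.reverse (segs l) := by
  induction fuel generalizing l cur acc with
  | zero =>
    have : l = [] := by cases l <;> simp_all <;> omega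
    subst this
    rw [PySem.Chars.splitOn.go]
    simp [segs, consHead]
  | succ n ih =>
    cases l with
    | nil =>
      rw [PySem.Chars.splitOn.go]
      simp [segs, consHead]
      omega
    | cons c t =>
      by_cases hc : (c == '/')
      · have hp : List.isPrefixOf ['/'] (c :: t) = true := by
          simp [List.isPrefixOf]; exact (beq_iff_eq.mp hc).symm ▸ rfl
        rw [show PySem.Chars.splitOn.go ['/'] (n+1) (c :: t) cur acc
              = PySem.Chars.splitOn.go ['/'] n (List.drop (List.length ['/']) (c :: t)) []
                  (cur.reverse :: acc) by rw [PySem.Chars.splitOn.go]; simp [hp]]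
        simp only [List.length_singleton, List.drop_succ_cons, List.drop_zero]
        rw [ih t [] (cur.reverse :: acc) (by simpa using Nat.le_of_succ_le_succ (by simpa using hf))]
        simp only [List.reverse_nil]
        rw [consHead_nil _ (segs_ne_nil t)]
        simp [segs, hc, consHead]
      · have hp : List.isPrefixOf ['/'] (c :: t) = false := by
          simp [List.isPrefixOf]; intro h; rw [h] at hc; simp at hc
        rw [show PySem.Chars.splitOn.go ['/'] (n+1) (c :: t) cur acc
              = PySem.Chars.splitOn.go ['/'] n t (c :: cur) acc by
            rw [PySem.Chars.splitOn.go]; simp [hp]]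
        rw [ih t (c :: cur) acc (by simpa using Nat.le_of_succ_le_succ (by simpa using hf))]
        cases hr : segs t with
        | nil => exact absurd hr (segs_ne_nil t)
        | cons s ss => simp [segs, hc, hr, consHead]

theorem splitOn_eq_segs (cs : List Char) : PySem.Chars.splitOn cs ['/'] = segs cs := by
  show PySem.Chars.splitOn.go ['/'] (cs.length + 1) cs [] [] = segs cs
  rw [splitOnGo_spec (cs.length + 1) cs [] [] (by omega)]
  simpa using consHead_nil _ (segs_ne_nil cs)

theorem segs_headI (cs : List Char) : (segs cs).headI = cs.takeWhile (fun c => !(c == '/')) := by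
  induction cs with
  | nil => simp [segs]
  | cons c r ih =>
    by_cases hc : (c == '/')
    · simp [segs, hc, List.takeWhile]
    · cases hr : segs r with
      | nil => exact absurd hr (segs_ne_nil r)
      | cons s ss =>
        have : s = r.takeWhile (fun c => !(c == '/')) := by rw [← ih, hr]; rfl
        simp [segs, hc, hr, List.takeWhile, this]

-- A's filtered-segment-list head equals B's dropWhile/takeWhile form
theorem tail_core (cs : List Char) :
    (let parts := (segs cs).filter (fun p => !p.isEmpty);
     if parts.isEmpty then none else some parts.headI)
    = (let t := cs.dropWhile (fun c => c == '/');
       if t.isEmpty then none else some (t.takeWhile (fun c => !(c == '/')))) := by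
  induction cs with
  | nil => simp [segs]
  | cons c r ih =>
    by_cases hc : (c == '/')
    · simpa [segs, hc, List.dropWhile] using ih
    · cases hr : segs r with
      | nil => exact absurd hr (segs_ne_nil r)
      | cons s ss =>
        have hs : s = r.takeWhile (fun c => !(c == '/')) := by
          have := segs_headI r; rw [hr] at this; simpa using this
        simp [segs, hc, hr, List.dropWhile, List.takeWhile, hs]

-- Source B's slash loop is dropWhile, its owner loop is takeWhile
theorem skipSlash_eq (l : List Char) : skipSlash l = l.dropWhile (fun c => c == '/') := by
  induction l with
  | nil => rfl
  | cons c t ih =>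
    by_cases h : c = '/'
    · simp [skipSlash, h, List.dropWhile_cons, ih]
    · simp [skipSlash, h, List.dropWhile_cons]

theorem ownerTake_eq (l : List Char) : ownerTake l = l.takeWhile (fun c => !(c == '/')) := by
  induction l with
  | nil => rfl
  | cons c t ih =>
    by_cases h : c = '/'
    · simp [ownerTake, h, List.takeWhile_cons]
    · simp [ownerTake, h, List.takeWhile_cons, ih]

-- the two shared tails agree on the same host and path
theorem tails_eq (host path : List Char) :
    pyTailA host path =
      (if host.isEmpty then none
       else if (skipSlash path).isEmpty then none
       else some (String.mk host, String.mk (ownerTake (skipSlash path)))) := by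
  unfold pyTailA
  by_cases hh : host.isEmpty
  · simp [hh]
  · simp only [hh, Bool.false_eq_true, if_false]
    rw [splitOn_eq_segs, skipSlash_eq]
    have hcore := tail_core path
    simp only at hcore
    by_cases hp : ((segs path).filter (fun p => !p.isEmpty)).isEmpty
    · rw [if_pos hp] at hcore ⊢
      by_cases hd : (path.dropWhile (fun c => c == '/')).isEmpty
      · simp [hd]
      · rw [if_neg hd] at hcore; exact absurd hcore (by simp)
    · rw [if_neg hp] at hcore ⊢
      by_cases hd : (path.dropWhile (fun c => c == '/')).isEmpty
      · rw [if_pos hd] at hcore; exact absurd hcore (by simp)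
      · rw [if_neg hd] at hcore
        simp only [if_neg hd]
        rw [Option.some_inj.mp hcore, ownerTake_eq]

-- proof-only model of Source B's "://" scan: the suffix after the FIRST occurrence
def dropAF : List Char → Option (List Char)
  | [] => none
  | c :: t => if [':', '/', '/'].isPrefixOf (c :: t) then some ((c :: t).drop 3) else dropAF t

theorem dropAF_colon (t : List Char) :
    dropAF (':' :: t) = if ['/', '/'].isPrefixOf t then some (t.drop 2) else dropAF t := by
  by_cases h : ['/', '/'].isPrefixOf t <;> simp [dropAF, List.isPrefixOf, h]

theorem dropAF_ne (c : Char) (t : List Char) (h : ¬ c = ':') : dropAF (c :: t) = dropAF t := by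
  have h' : (':' == c) = false := by simp; exact fun e => h e.symm
  simp [dropAF, List.isPrefixOf, h']

theorem scanScheme_three (l : List Char) : scanScheme l 3 = some l := by
  cases l <;> simp [scanScheme]

theorem scan_correct (l : List Char) :
    scanScheme l 0 = dropAF l ∧
    scanScheme l 1 = (if ['/', '/'].isPrefixOf l then some (l.drop 2) else dropAF l) ∧
    scanScheme l 2 = (if ['/'].isPrefixOf l then some (l.drop 1) else dropAF l) := by
  induction l with
  | nil => refine ⟨rfl, ?_, ?_⟩ <;> simp [scanScheme, List.isPrefixOf, dropAF]
  | cons c t ih =>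
    obtain ⟨ih0, ih1, ih2⟩ := ih
    refine ⟨?_, ?_, ?_⟩
    · by_cases hc : c = ':'
      · subst hc
        rw [show scanScheme (':' :: t) 0 = scanScheme t 1 from by simp [scanScheme],
            ih1, dropAF_colon]
      · rw [show scanScheme (c :: t) 0 = scanScheme t 0 from by simp [scanScheme, hc],
            ih0, dropAF_ne c t hc]
    · by_cases hs : c = '/'
      · subst hs
        rw [show scanScheme ('/' :: t) 1 = scanScheme t 2 from by simp [scanScheme],
            ih2, dropAF_ne '/' t (by decide)]
        simp [List.isPrefixOf]
      · by_cases hc : c = ':'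
        · subst hc
          rw [show scanScheme (':' :: t) 1 = scanScheme t 1 from by simp [scanScheme],
              ih1, dropAF_colon]
          have : (['/', '/'].isPrefixOf (':' :: t)) = false := by simp [List.isPrefixOf]
          simp [this]
        · rw [show scanScheme (c :: t) 1 = scanScheme t 0 from by simp [scanScheme, hc, hs],
              ih0, dropAF_ne c t hc]
          have h' : ('/' == c) = false := by simp; exact fun e => hs e.symm
          simp [List.isPrefixOf, h']
    · by_cases hs : c = '/'
      · subst hs
        rw [show scanScheme ('/' :: t) 2 = scanScheme t 3 from by simp [scanScheme],
            scanScheme_three]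
        simp [List.isPrefixOf]
      · by_cases hc : c = ':'
        · subst hc
          rw [show scanScheme (':' :: t) 2 = scanScheme t 1 from by simp [scanScheme],
              ih1, dropAF_colon]
          have : (['/'].isPrefixOf (':' :: t)) = false := by simp [List.isPrefixOf]
          simp [this]
        · rw [show scanScheme (c :: t) 2 = scanScheme t 0 from by simp [scanScheme, hc, hs],
              ih0, dropAF_ne c t hc]
          have h' : ('/' == c) = false := by simp; exact fun e => hs e.symm
          simp [List.isPrefixOf, h']

-- the first-occurrence model against A's Chars.find
theorem dropAF_eq (l : List Char) :
    dropAF l = if PySem.Chars.find l [':', '/', '/'] = -1 then none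
               else some (l.drop ((PySem.Chars.find l [':', '/', '/']).toNat + 3)) := by
  induction l with
  | nil =>
    have : PySem.Chars.find [] [':', '/', '/'] = -1 := by
      show PySem.Chars.find.go _ [] 0 = -1
      rw [PySem.Chars.find.go]; simp
    simp [dropAF, this]
  | cons c t ih =>
    by_cases hp : [':', '/', '/'].isPrefixOf (c :: t)
    · have h0 : PySem.Chars.find (c :: t) [':', '/', '/'] = 0 := by
        show PySem.Chars.find.go _ (c :: t) 0 = 0
        rw [PySem.Chars.find.go]; simp [hp]
      simp [dropAF, hp, h0]
    · rw [show dropAF (c :: t) = dropAF t by simp [dropAF, hp]]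
      rw [find_cons_shift [':', '/', '/'] (by simp) c t (Bool.eq_false_iff.mpr hp), ih]
      by_cases hf : PySem.Chars.find t [':', '/', '/'] = -1
      · simp [hf]
      · have hb : -1 ≤ PySem.Chars.find t [':', '/', '/'] :=
          PySem.Chars.neg_one_le_find t [':', '/', '/']
        have h1 : ¬ (PySem.Chars.find t [':', '/', '/'] + 1 = -1) := by omega
        have ht : (PySem.Chars.find t [':', '/', '/'] + 1).toNat
            = (PySem.Chars.find t [':', '/', '/']).toNat + 1 := by omega
        simp only [hf, if_neg hf, if_neg h1, if_false, ht]
        rw [show (PySem.Chars.find t [':', '/', '/']).toNat + 1 + 3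
              = ((PySem.Chars.find t [':', '/', '/']).toNat + 3) + 1 from by omega]
        simp [List.drop_succ_cons]

theorem drop_four (r : List Char) (x1 x2 x3 x4 : Char) :
    PySem.List.slice (x1 :: x2 :: x3 :: x4 :: r) (some 4) none = r := by
  rw [show ((4 : Int)) = ((4 : Nat) : Int) by norm_num, PySem.List.slice_from_natCast]
  rfl

-- ===== VERDICT (by name: the statement is the Claim_ definition above) =====
theorem parse_remote_url_spec : Claim_equal_parse_remote_url := by
  intro url _
  unfold Spec_parse_remote_url parse_remote_url parse_remote_url_alt
  simp only []
  by_cases hg : PySem.Chars.startswith url.toList "git@".toList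
  · rw [if_pos hg, if_pos hg]
    have hpre : "git@".toList <+: url.toList := (PySem.Chars.startswith_iff _ _).mp hg
    obtain ⟨rr, hr⟩ := hpre
    have hu : url.toList = 'g' :: 'i' :: 't' :: '@' :: rr := by rw [← hr]; rfl
    rw [hu]
    rw [partitionA_cons ':' 'g' _ (by decide), partitionA_cons ':' 'i' _ (by decide),
        partitionA_cons ':' 't' _ (by decide), partitionA_cons ':' '@' _ (by decide)]
    simp only [List.drop_succ_cons, List.drop_zero]
    rw [hostSplit_eq]
    by_cases hb : (pyPartitionA rr [':']).2.1
    · simp only [hb, Bool.not_true, Bool.false_eq_true, if_false]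
      rw [drop_four, tails_eq]
    · have hb' : (pyPartitionA rr [':']).2.1 = false := by simpa using hb
      rw [partitionA_notfound ':' rr hb']
      simp only [hb', Bool.not_false, if_pos trivial, if_true]
      by_cases he : (rr : List Char).isEmpty
      · simp [he]
      · simp [he, skipSlash]
  · rw [if_neg hg, if_neg hg]
    have h0 := (scan_correct url.toList).1
    rw [h0, dropAF_eq]
    by_cases hin : PySem.Chars.isIn "://".toList url.toList
    · rw [if_pos hin]
      have hfind : PySem.Chars.find url.toList [':', '/', '/'] ≠ -1 := by
        rw [ne_eq, PySem.Chars.find_eq_neg_one_iff]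
        simpa using (PySem.Chars.isIn_iff_infix _ _).mp hin
      rw [if_neg hfind]
      have hA : (pyPartitionA url.toList "://".toList).2.2
          = url.toList.drop ((PySem.Chars.find url.toList [':', '/', '/']).toNat + 3) := by
        unfold pyPartitionA
        simp only [show ("://".toList) = [':', '/', '/'] from rfl, if_neg hfind]
        rfl
      rw [hA, tails_eq]
      simp only [hostSplit_eq]
    · rw [if_neg hin]
      have hfe : PySem.Chars.find url.toList "://".toList = -1 := by
        rw [PySem.Chars.find_eq_neg_one_iff]
        exact fun h => hin ((PySem.Chars.isIn_iff_infix _ _).mpr h)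
      have hfe' : PySem.Chars.find url.toList [':', '/', '/'] = -1 := hfe
      rw [if_pos hfe']
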